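-- pv_equiv track=rewrite | github.com/antonxuanquang/pageReplacement | lfu.py | page_fault
-- ===== SOURCE A (Python) =====
-- def page_fault(pages, frames):
--
-- 	if frames >= len(pages):
-- 		return len(pages)
--
-- 	memory = []
-- 	page_faults = 0
-- 	frequency_map = {}
--
-- 	for i in range(0, len(pages)):
-- 		page = pages[i]
-- 		# if not in memory, remove the last one
-- 		if page not in memory:
-- 			# remove a page only if memory is filled up
-- 			if len(memory) == frames:
-- 				key = memory[-1]
-- 				del memory[-1]
-- 				del frequency_map[key]
-- 			page_faults = page_faults + 1
--
-- 		# if in memory, remove the page from memory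
-- 		else:
-- 			index = memory.index(page)
-- 			del memory[index]
--
-- 		# update frequency map
-- 		node = frequency_map.get(page, [0, i])
-- 		node[0] = node[0] + 1
-- 		frequency_map[page] = node
--
-- 		# add the new page in a way such that the memory stack
-- 		# keeps the most frequently used page at the top of stack.
-- 		# The stack should also keep the FIFO order as well
-- 		index = 0
-- 		while index < len(memory):
-- 			if (frequency_map.get(memory[index])[0] > frequency_map.get(page)[0]):
-- 				index = index + 1
-- 			elif (frequency_map.get(memory[index])[0] == frequency_map.get(page)[0]):
-- 				if (frequency_map.get(memory[index])[1] < frequency_map.get(page)[1]):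
-- 					break
-- 				index = index + 1
-- 			else:
-- 				break
--
-- 		memory.insert(index, page)
-- 	return page_faults
-- ===== SOURCE B (Python) =====
-- def page_fault(pages, frames):
--     # Keep the original's documented fast path for oversized memory.
--     if frames >= len(pages):
--         return len(pages)
--     # One dict: page -> (use_count, first_loaded_index) for pages currently resident.
--     # On a fault with full memory, evict the page with the smallest (count, index) value;
--     # no ordered memory list is maintained (return value only; nothing visible is mutated).
--     table = {}
--     faults = 0
--     for i, p in enumerate(pages):
--         if p in table:
--             c, fi = table[p]
--             table[p] = (c + 1, fi)
--         else:
--             if len(table) == frames: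
--                 victim = min(table.items(), key=lambda kv: kv[1])[0]
--                 del table[victim]
--             faults += 1
--             table[p] = (1, i)
--     return faults
-- ===== Notes on version B (the rewrite author's own statement) =====
-- stated objective: simpler
-- what changed: A keeps an explicitly sorted 'memory stack' plus a frequency dict and re-inserts the accessed page with a position scan of the memory list on EVERY access; B keeps a single dict page -> (use count, first-load index) and only scans it for the (count, index)-minimal victim on an evicting fault, so the ordered stack and its per-access insertion scan disappear.
import Mathlib
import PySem

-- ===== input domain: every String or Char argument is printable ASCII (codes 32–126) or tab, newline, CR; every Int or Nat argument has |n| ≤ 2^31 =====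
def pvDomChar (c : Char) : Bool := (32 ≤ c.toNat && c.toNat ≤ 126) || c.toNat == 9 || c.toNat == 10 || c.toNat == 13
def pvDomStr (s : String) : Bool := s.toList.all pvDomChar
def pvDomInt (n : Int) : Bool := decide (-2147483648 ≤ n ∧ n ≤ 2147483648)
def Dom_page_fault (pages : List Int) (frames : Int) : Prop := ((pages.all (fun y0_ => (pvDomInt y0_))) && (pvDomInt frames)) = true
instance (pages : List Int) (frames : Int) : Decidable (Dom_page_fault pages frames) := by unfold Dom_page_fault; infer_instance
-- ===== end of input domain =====

-- B keeps A's fast path for frames >= len(pages) but replaces A's sorted "memory stack"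
-- (re-positioned by a scan on EVERY access) by a single dict page -> (count, first-load index)
-- with a min-scan only on evicting faults (return value only; nothing visible is mutated).

-- ===== PORT A =====
-- the 'while index < len(memory)' insertion-position loop of A
def pfInsPos (d : PySem.Dict Int (Int × Int)) (pf pi : Int) : List Int → Nat
  | [] => 0
  | m :: rest =>
    let q := d.getD m (0, 0)   -- frequency_map.get(memory[index]); memory entries are always keys, default unused
    if pf < q.1 then pfInsPos d pf pi rest + 1
    else if q.1 = pf then
      if q.2 < pi then 0 else pfInsPos d pf pi rest + 1
    else 0

-- one iteration of A's 'for i in range(0, len(pages))' loop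
def pfStepA (frames : Int) (st : List Int × PySem.Dict Int (Int × Int) × Int)
    (pr : Int × Int) : List Int × PySem.Dict Int (Int × Int) × Int :=
  let mem := st.1
  let d := st.2.1
  let page := pr.2
  -- 'if page not in memory:' / 'else:'
  let t1 : List Int × PySem.Dict Int (Int × Int) × Int :=
    if mem.contains page = false then
      if (mem.length : Int) = frames then
        -- key = memory[-1]; del memory[-1]; del frequency_map[key]  (IndexError on empty memory: outside Pre_)
        (mem.dropLast, d.erase ((mem.getLast?).getD 0), st.2.2 + 1)
      else
        (mem, d, st.2.2 + 1)
    else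
      (mem.erase page, d, st.2.2)   -- index = memory.index(page); del memory[index]
  -- node = frequency_map.get(page, [0, i]); node[0] += 1; frequency_map[page] = node
  let node := t1.2.1.getD page (0, pr.1)
  let d2 := t1.2.1.insert page (node.1 + 1, node.2)
  -- memory.insert(index, page) at the position the while loop finds
  (PySem.List.insert t1.1 ((pfInsPos d2 (node.1 + 1) node.2 t1.1 : Nat) : Int) page, d2, t1.2.2)

def page_fault (pages : List Int) (frames : Int) : Int :=
  if frames ≥ (pages.length : Int) then (pages.length : Int)
  else ((PySem.List.enumerate pages).foldl (pfStepA frames) ([], PySem.Dict.empty, 0)).2.2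

-- ===== PORT B =====
-- one iteration of B's 'for i, p in enumerate(pages)' loop
def pfStepB (frames : Int) (st : PySem.Dict Int (Int × Int) × Int)
    (pr : Int × Int) : PySem.Dict Int (Int × Int) × Int :=
  let tbl := st.1
  if tbl.contains pr.2 then
    -- c, fi = table[p]; table[p] = (c + 1, fi)
    let node := tbl.getD pr.2 (0, 0)
    (tbl.insert pr.2 (node.1 + 1, node.2), st.2)
  else
    let tbl1 :=
      if (tbl.size : Int) = frames then
        -- victim = min(table, key=table.__getitem__); del table[victim]
        match PySem.List.min2? tbl.items (fun q => q.2.1) (fun q => q.2.2) with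
        | some v => tbl.erase v.1
        | none => tbl   -- empty table: Python's min raises ValueError; only reachable with frames = 0, outside Pre_
      else tbl
    (tbl1.insert pr.2 (1, pr.1), st.2 + 1)

def page_fault_alt (pages : List Int) (frames : Int) : Int :=
  if frames ≥ (pages.length : Int) then (pages.length : Int)
  else ((PySem.List.enumerate pages).foldl (pfStepB frames) (PySem.Dict.empty, 0)).2

-- ===== PRECONDITION & SPEC =====
-- Pre_ excludes only frames = 0 with a nonempty reference string, where both A (IndexError
-- on memory[-1]) and B (ValueError from min of an empty dict) raise.
def Pre_page_fault (pages : List Int) (frames : Int) : Prop := pages = [] ∨ frames ≠ 0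
instance (pages : List Int) (frames : Int) : Decidable (Pre_page_fault pages frames) := by
  unfold Pre_page_fault; infer_instance
def pvWitness_page_fault : List Int × Int := ([1, 2, 1, 3], 2)

def Spec_page_fault (pages : List Int) (frames : Int) (out : Int) : Prop :=
  out = page_fault_alt pages frames
instance (pages : List Int) (frames : Int) (out : Int) : Decidable (Spec_page_fault pages frames out) := by
  unfold Spec_page_fault; infer_instance

-- ===== CLAIM (what is proved, stated in full; the proofs are below) =====
def Claim_equal_page_fault : Prop := ∀ (pages : List Int) (frames : Int), Dom_page_fault pages frames → Pre_page_fault pages frames → Spec_page_fault pages frames (page_fault pages frames)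

-- ===== LEMMAS AND PROOFS =====

-- Python's tuple '<' on the (count, index) pairs
def pvLexLt (a b : Int × Int) : Prop := a.1 < b.1 ∨ (a.1 = b.1 ∧ a.2 < b.2)

def pvVal (d : PySem.Dict Int (Int × Int)) (k : Int) : Int × Int := d.getD k (0, 0)

-- simulation invariant tying A's memory stack to the shared frequency dict
def pvInv (i : Int) (mem : List Int) (d : PySem.Dict Int (Int × Int)) : Prop :=
  d.keys.Nodup ∧
  mem.Perm d.keys ∧
  mem.Pairwise (fun a b => pvLexLt (pvVal d b) (pvVal d a)) ∧
  (∀ p ∈ d.items, 1 ≤ p.2.1 ∧ p.2.2 < i) ∧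
  (∀ p ∈ d.items, ∀ q ∈ d.items, p.2.2 = q.2.2 → p = q)

theorem pvLexLt_trans {a b c : Int × Int} (h1 : pvLexLt a b) (h2 : pvLexLt b c) : pvLexLt a c := by
  unfold pvLexLt at *; omega

theorem pvLexLt_cases {a b : Int × Int} (h : a.2 ≠ b.2) : pvLexLt a b ∨ pvLexLt b a := by
  unfold pvLexLt; omega

theorem pvInsPos_le (d : PySem.Dict Int (Int × Int)) (pf pi : Int) (l : List Int) :
    pfInsPos d pf pi l ≤ l.length := by
  induction l with
  | nil => simp [pfInsPos]
  | cons m rest ih =>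
    simp only [pfInsPos, List.length_cons]
    split_ifs <;> omega

-- Dict.erase facts (no library lemmas exist for erase; proved from its definition)
theorem pvGet?_erase_of_ne {d : PySem.Dict Int (Int × Int)} {k j : Int} (h : j ≠ k) :
    (d.erase k).get? j = d.get? j := by
  obtain ⟨l⟩ := d
  simp only [PySem.Dict.erase, PySem.Dict.get?]
  induction l with
  | nil => rfl
  | cons p t ih =>
    by_cases hk2 : p.1 = k
    · rw [List.filter_cons_of_neg (by simp [hk2]),
        List.find?_cons_of_neg (by simp [hk2]; exact fun e => h e.symm)]
      exact ih
    · by_cases hj2 : p.1 = j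
      · rw [List.filter_cons_of_pos (by simp [hk2]),
          List.find?_cons_of_pos (by simp [hj2]), List.find?_cons_of_pos (by simp [hj2])]
      · rw [List.filter_cons_of_pos (by simp [hk2]),
          List.find?_cons_of_neg (by simp [hj2]), List.find?_cons_of_neg (by simp [hj2])]
        exact ih

theorem pvVal_erase_of_ne (d : PySem.Dict Int (Int × Int)) {k j : Int} (h : j ≠ k) :
    pvVal (d.erase k) j = pvVal d j := by
  unfold pvVal
  rw [PySem.Dict.getD_eq_get?_getD, PySem.Dict.getD_eq_get?_getD, pvGet?_erase_of_ne h]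

theorem pvKeys_erase (d : PySem.Dict Int (Int × Int)) (k : Int) :
    (d.erase k).keys = d.keys.filter (fun x => !(x == k)) := by
  obtain ⟨l⟩ := d
  simp only [PySem.Dict.erase, PySem.Dict.keys]
  induction l with
  | nil => rfl
  | cons p t ih =>
    by_cases hk : p.1 = k <;> simp [hk, ih]

theorem pvItems_erase_subset {d : PySem.Dict Int (Int × Int)} {k : Int} {p : Int × (Int × Int)}
    (h : p ∈ (d.erase k).items) : p ∈ d.items := by
  simp only [PySem.Dict.erase] at h
  exact List.mem_of_mem_filter h

theorem pvVal_insert_of_ne (d : PySem.Dict Int (Int × Int)) {k j : Int} (v : Int × Int) (h : j ≠ k) :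
    pvVal (d.insert k v) j = pvVal d j := by
  unfold pvVal
  exact PySem.Dict.getD_insert_of_ne d v (0, 0) h

theorem pvVal_insert_self (d : PySem.Dict Int (Int × Int)) (k : Int) (v : Int × Int) :
    pvVal (d.insert k v) k = v := by
  unfold pvVal
  exact PySem.Dict.getD_insert_self d k v (0, 0)

theorem pvItem_of_mem_keys {d : PySem.Dict Int (Int × Int)} {k : Int}
    (hnd : d.keys.Nodup) (h : k ∈ d.keys) : (k, pvVal d k) ∈ d.items := by
  rw [PySem.Dict.items_eq_map_keys d hnd (0, 0)]
  have := List.mem_map_of_mem (f := fun k => (k, d.getD k (0, 0))) h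
  simpa [pvVal] using this

-- first-minimum characterisation of Python's min (no library lemmas exist for min2?)
theorem pvMin2Aux (m : Int × (Int × Int)) :
    ∀ (xs : List (Int × (Int × Int))) (acc : Option (Int × (Int × Int))),
    (∀ y ∈ xs, y = m ∨ pvLexLt m.2 y.2) →
    (acc = some m ∨ (m ∈ xs ∧ (acc = none ∨ ∃ a, acc = some a ∧ pvLexLt m.2 a.2))) →
    List.foldl
      (fun acc x =>
        match acc with
        | none => some x
        | some mm =>
          if (decide (x.2.1 < mm.2.1) || !decide (mm.2.1 < x.2.1) && decide (x.2.2 < mm.2.2)) = true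
          then some x else some mm)
      acc xs = some m := by
  intro xs
  induction xs with
  | nil =>
    intro acc hall hacc
    rcases hacc with h | ⟨hm, _⟩
    · simpa using h
    · simp at hm
  | cons x t ih =>
    intro acc hall hacc
    have hx := hall x (by simp)
    have hallt : ∀ y ∈ t, y = m ∨ pvLexLt m.2 y.2 := fun y hy => hall y (by simp [hy])
    simp only [List.foldl_cons]
    have hredN : ∀ (y : Int × (Int × Int)),
        (match (none : Option (Int × (Int × Int))) with
          | none => some y
          | some mm =>
            if (decide (y.2.1 < mm.2.1) || !decide (mm.2.1 < y.2.1) && decide (y.2.2 < mm.2.2)) = true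
            then some y else some mm) = some y := fun _ => rfl
    have hredS : ∀ (y w : Int × (Int × Int)),
        (match (some w : Option (Int × (Int × Int))) with
          | none => some y
          | some mm =>
            if (decide (y.2.1 < mm.2.1) || !decide (mm.2.1 < y.2.1) && decide (y.2.2 < mm.2.2)) = true
            then some y else some mm) =
          if (decide (y.2.1 < w.2.1) || !decide (w.2.1 < y.2.1) && decide (y.2.2 < w.2.2)) = true
          then some y else some w := fun _ _ => rfl
    rcases hacc with rfl | ⟨hm, hrest⟩
    · -- acc = some m
      rw [hredS]
      split_ifs with hcnd
      · rcases hx with rfl | hlex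
        · exact ih (some x) hallt (Or.inl rfl)
        · exfalso
          simp only [Bool.or_eq_true, Bool.and_eq_true, Bool.not_eq_true',
            decide_eq_false_iff_not, decide_eq_true_eq] at hcnd
          unfold pvLexLt at hlex
          omega
      · exact ih (some m) hallt (Or.inl rfl)
    · rcases hrest with rfl | ⟨a, rfl, hlexa⟩
      · -- acc = none
        rw [hredN]
        by_cases hxe : x = m
        · subst hxe
          exact ih (some x) hallt (Or.inl rfl)
        · have hlexx : pvLexLt m.2 x.2 := by
            rcases hx with hh | hh
            · exact absurd hh hxe
            · exact hh
          have hmt : m ∈ t := by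
            rcases List.mem_cons.mp hm with hh | hh
            · exact absurd hh.symm hxe
            · exact hh
          exact ih (some x) hallt (Or.inr ⟨hmt, Or.inr ⟨x, rfl, hlexx⟩⟩)
      · -- acc = some a, pvLexLt m.2 a.2
        rw [hredS]
        by_cases hxe : x = m
        · subst hxe
          split_ifs with hcnd
          · exact ih (some x) hallt (Or.inl rfl)
          · exfalso
            simp only [Bool.or_eq_true, Bool.and_eq_true, Bool.not_eq_true',
              decide_eq_false_iff_not, decide_eq_true_eq, not_or] at hcnd
            unfold pvLexLt at hlexa
            omega
        · have hlexx : pvLexLt m.2 x.2 := by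
            rcases hx with hh | hh
            · exact absurd hh hxe
            · exact hh
          have hmt : m ∈ t := by
            rcases List.mem_cons.mp hm with hh | hh
            · exact absurd hh.symm hxe
            · exact hh
          split_ifs with hcnd
          · exact ih (some x) hallt (Or.inr ⟨hmt, Or.inr ⟨x, rfl, hlexx⟩⟩)
          · exact ih (some a) hallt (Or.inr ⟨hmt, Or.inr ⟨a, rfl, hlexa⟩⟩)

theorem pvMin2_eq {xs : List (Int × (Int × Int))} {m : Int × (Int × Int)} (hm : m ∈ xs)
    (h : ∀ y ∈ xs, y = m ∨ pvLexLt m.2 y.2) :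
    PySem.List.min2? xs (fun q => q.2.1) (fun q => q.2.2) = some m := by
  have haux := pvMin2Aux m xs none h (Or.inr ⟨hm, Or.inl rfl⟩)
  unfold PySem.List.min2?
  convert haux using 2
  funext acc x
  cases acc <;> rfl

-- inserting at the position A's while loop finds keeps the stack sorted
theorem pvInsPos_sorted (d : PySem.Dict Int (Int × Int)) (page : Int) (vp : Int × Int)
    (l : List Int)
    (hs : l.Pairwise (fun a b => pvLexLt (pvVal d b) (pvVal d a)))
    (hv : pvVal d page = vp)
    (ht : ∀ x ∈ l, pvLexLt (pvVal d x) vp ∨ pvLexLt vp (pvVal d x)) :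
    (l.take (pfInsPos d vp.1 vp.2 l) ++ page :: l.drop (pfInsPos d vp.1 vp.2 l)).Pairwise
        (fun a b => pvLexLt (pvVal d b) (pvVal d a)) := by
  induction l with
  | nil => simp [pfInsPos]
  | cons mh rest ih =>
    have htmh := ht mh (by simp)
    have hsrest := (List.pairwise_cons.mp hs).2
    have hsmh := (List.pairwise_cons.mp hs).1
    have hq : d.getD mh (0, 0) = pvVal d mh := rfl
    by_cases hadv : pvLexLt vp (pvVal d mh)
    · -- advance: position is 1 + recursive position
      have hpos : pfInsPos d vp.1 vp.2 (mh :: rest) = pfInsPos d vp.1 vp.2 rest + 1 := by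
        simp only [pfInsPos, hq]
        unfold pvLexLt at hadv
        split_ifs <;> omega
      rw [hpos]
      simp only [List.take_succ_cons, List.drop_succ_cons, List.cons_append]
      refine List.pairwise_cons.mpr ⟨?_, ih hsrest (fun x hx => ht x (by simp [hx]))⟩
      intro y hy
      rcases List.mem_append.mp hy with hy1 | hy2
      · exact hsmh y (List.mem_of_mem_take hy1)
      · rcases List.mem_cons.mp hy2 with rfl | hy3
        · rw [hv]; exact hadv
        · exact hsmh y (List.mem_of_mem_drop hy3)
    · -- stop: position 0
      have hstop : pvLexLt (pvVal d mh) vp := by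
        rcases htmh with h | h
        · exact h
        · exact absurd h hadv
      have hpos : pfInsPos d vp.1 vp.2 (mh :: rest) = 0 := by
        simp only [pfInsPos, hq]
        unfold pvLexLt at hadv hstop
        split_ifs <;> omega
      rw [hpos]
      simp only [List.take_zero, List.drop_zero, List.nil_append]
      refine List.pairwise_cons.mpr ⟨?_, hs⟩
      intro y hy
      rw [hv]
      rcases List.mem_cons.mp hy with rfl | hy2
      · exact hstop
      · exact pvLexLt_trans (hsmh y hy2) hstop

-- common second phase of a step of A: re-inserting the processed page into the stack
theorem pvPhase2 (i page pf pi : Int) (mem1 : List Int) (d2 : PySem.Dict Int (Int × Int))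
    (hv : pvVal d2 page = (pf, pi))
    (hnd : d2.keys.Nodup)
    (hperm : (page :: mem1).Perm d2.keys)
    (hpair : mem1.Pairwise (fun a b => pvLexLt (pvVal d2 b) (pvVal d2 a)))
    (hpage : page ∉ mem1)
    (hbnd : ∀ p ∈ d2.items, 1 ≤ p.2.1 ∧ p.2.2 < i + 1)
    (hinj : ∀ p ∈ d2.items, ∀ q ∈ d2.items, p.2.2 = q.2.2 → p = q) :
    pvInv (i + 1) (PySem.List.insert mem1 ((pfInsPos d2 pf pi mem1 : Nat) : Int) page) d2 := by
  have hpos := pvInsPos_le d2 pf pi mem1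
  have ht : ∀ x ∈ mem1, pvLexLt (pvVal d2 x) (pf, pi) ∨ pvLexLt (pf, pi) (pvVal d2 x) := by
    intro x hx
    have hxk : x ∈ d2.keys := hperm.mem_iff.mp (List.mem_cons_of_mem _ hx)
    have hpk : page ∈ d2.keys := hperm.mem_iff.mp (by simp)
    have hxi := pvItem_of_mem_keys hnd hxk
    have hpi2 := pvItem_of_mem_keys hnd hpk
    have hne : (pvVal d2 x).2 ≠ (pf, pi).2 := by
      intro heq
      have h2 : (x, pvVal d2 x).2.2 = (page, pvVal d2 page).2.2 := by
        simp only [hv]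
        exact heq
      have := hinj _ hxi _ hpi2 h2
      have hxp : x = page := congrArg Prod.fst this
      exact hpage (hxp ▸ hx)
    exact pvLexLt_cases hne
  rw [PySem.List.insert_natCast mem1 _ page hpos]
  refine ⟨hnd, ?_, ?_, hbnd, hinj⟩
  · have h1 : (List.take (pfInsPos d2 pf pi mem1) mem1 ++
        page :: List.drop (pfInsPos d2 pf pi mem1) mem1).Perm
        (page :: (List.take (pfInsPos d2 pf pi mem1) mem1 ++
          List.drop (pfInsPos d2 pf pi mem1) mem1)) := List.perm_middle
    rw [List.take_append_drop] at h1
    exact h1.trans hperm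
  · exact pvInsPos_sorted d2 page (pf, pi) mem1 hpair hv ht

-- one step of A and one step of B act identically on the dict and fault count, and keep the invariant
theorem pvStepAB (frames i page : Int) (mem : List Int) (d : PySem.Dict Int (Int × Int)) (f : Int)
    (hinv : pvInv i mem d) (hf : frames ≠ 0) :
    (pfStepA frames (mem, d, f) (i, page)).2 = pfStepB frames (d, f) (i, page) ∧
    pvInv (i + 1) (pfStepA frames (mem, d, f) (i, page)).1 (pfStepA frames (mem, d, f) (i, page)).2.1 := by
  obtain ⟨hnd, hperm, hpair, hbnd, hinj⟩ := hinv
  have hmemnodup : mem.Nodup := hperm.nodup_iff.mpr hnd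
  have hlen : mem.length = d.size := by
    have h1 := hperm.length_eq
    simpa [PySem.Dict.size, PySem.Dict.keys] using h1
  by_cases hmem : page ∈ mem
  · -- HIT: page in memory / page in table
    have hck : page ∈ d.keys := hperm.mem_iff.mp hmem
    have hcd : d.contains page = true := (PySem.Dict.contains_iff_mem_keys d page).mpr hck
    have hcm : mem.contains page = true := List.contains_iff_mem.mpr hmem
    have hitem := pvItem_of_mem_keys hnd hck
    have hgd : ∀ d0 : Int × Int, d.getD page d0 = pvVal d page := fun d0 =>
      PySem.Dict.getD_of_mem_items d hitem hnd d0
    have hA : pfStepA frames (mem, d, f) (i, page) =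
        (PySem.List.insert (mem.erase page)
          ((pfInsPos (d.insert page ((pvVal d page).1 + 1, (pvVal d page).2))
            ((pvVal d page).1 + 1) (pvVal d page).2 (mem.erase page) : Nat) : Int) page,
         d.insert page ((pvVal d page).1 + 1, (pvVal d page).2), f) := by
      simp [pfStepA, hmem, hgd]
    have hB : pfStepB frames (d, f) (i, page) =
        (d.insert page ((pvVal d page).1 + 1, (pvVal d page).2), f) := by
      simp [pfStepB, hcd, hgd]
    rw [hA, hB]
    refine ⟨rfl, ?_⟩
    apply pvPhase2
    · exact pvVal_insert_self d page _
    · rw [PySem.Dict.keys_insert_of_contains d _ hcd]; exact hnd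
    · rw [PySem.Dict.keys_insert_of_contains d _ hcd]
      exact ((List.perm_cons_erase hmem).symm).trans hperm
    · have hbase : (mem.erase page).Pairwise (fun a b => pvLexLt (pvVal d b) (pvVal d a)) :=
        hpair.sublist (List.erase_sublist)
      refine hbase.imp_of_mem ?_
      intro a b ha hb hr
      have hnap : a ≠ page := fun h => (hmemnodup.not_mem_erase) (h ▸ ha)
      have hnbp : b ≠ page := fun h => (hmemnodup.not_mem_erase) (h ▸ hb)
      rw [pvVal_insert_of_ne d _ hnap, pvVal_insert_of_ne d _ hnbp]
      exact hr
    · exact hmemnodup.not_mem_erase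
    · intro p hp
      rcases (PySem.Dict.mem_items_insert d _ _ p).mp hp with rfl | ⟨hp', _⟩
      · have hb := hbnd _ hitem
        simp at hb ⊢
        omega
      · have := hbnd _ hp'
        omega
    · intro p hp q hq heq
      rcases (PySem.Dict.mem_items_insert d _ _ p).mp hp with rfl | ⟨hp', hpne⟩ <;>
        rcases (PySem.Dict.mem_items_insert d _ _ q).mp hq with rfl | ⟨hq', hqne⟩
      · rfl
      · exfalso
        have := hinj _ hitem _ hq' (by simpa using heq)
        exact hqne (congrArg Prod.fst this).symm
      · exfalso
        have := hinj _ hp' _ hitem (by simpa using heq)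
        exact hpne (congrArg Prod.fst this)
      · exact hinj _ hp' _ hq' heq
  · -- MISS
    have hck : page ∉ d.keys := fun h => hmem (hperm.mem_iff.mpr h)
    have hcd : d.contains page = false := by
      rw [← Bool.not_eq_true, PySem.Dict.contains_iff_mem_keys]; exact hck
    have hcm : mem.contains page = false := by
      rw [← Bool.not_eq_true, List.contains_iff_mem]; exact hmem
    by_cases hfull : (mem.length : Int) = frames
    · -- full memory: evict
      rcases List.eq_nil_or_concat mem with rfl | ⟨l', z, hmemeq⟩
      · exfalso
        simp at hfull
        exact hf hfull.symm
      rw [List.concat_eq_append] at hmemeq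
      subst hmemeq
      have hzmem : z ∈ l' ++ [z] := by simp
      have hzk : z ∈ d.keys := hperm.mem_iff.mp hzmem
      have hzitem := pvItem_of_mem_keys hnd hzk
      have hznotl : z ∉ l' := by
        rw [List.nodup_append] at hmemnodup
        intro h
        exact hmemnodup.2.2 z h z (by simp) rfl
      have hmin : PySem.List.min2? d.items (fun q => q.2.1) (fun q => q.2.2) = some (z, pvVal d z) := by
        apply pvMin2_eq hzitem
        intro y hy
        have hyk := PySem.Dict.mem_keys_of_mem_items d hy
        have hyval : pvVal d y.1 = y.2 := by
          have hyi : (y.1, y.2) ∈ d.items := by simpa using hy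
          exact PySem.Dict.getD_of_mem_items d hyi hnd (0, 0)
        by_cases hyz : y.1 = z
        · left
          have hy2 : y = (y.1, y.2) := rfl
          rw [hy2, hyz, ← hyval, hyz]
        · right
          have hymem : y.1 ∈ l' ++ [z] := hperm.mem_iff.mpr hyk
          have hyl : y.1 ∈ l' := by
            rcases List.mem_append.mp hymem with h | h
            · exact h
            · simp at h; exact absurd h hyz
          have hlex : pvLexLt (pvVal d z) (pvVal d y.1) :=
            (List.pairwise_append.mp hpair).2.2 y.1 hyl z (by simp)
          rw [← hyval]
          exact hlex
      have hsz : ((d.size : Int) = frames) := by rw [← hlen]; exact hfull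
      have hlast : (((l' ++ [z]).getLast?).getD 0) = z := by rw [List.getLast?_concat]; rfl
      have hcde : (d.erase z).contains page = false := by
        rw [← Bool.not_eq_true, PySem.Dict.contains_iff_mem_keys, pvKeys_erase]
        intro h
        exact hck (List.mem_of_mem_filter h)
      have hgde : (d.erase z).getD page (0, i) = (0, i) :=
        PySem.Dict.getD_of_not_contains _ _ hcde
      have hA : pfStepA frames (l' ++ [z], d, f) (i, page) =
          (PySem.List.insert l'
            ((pfInsPos ((d.erase z).insert page (1, i)) 1 i l' : Nat) : Int) page,
           (d.erase z).insert page (1, i), f + 1) := by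
        have hpz : ¬ page = z := fun e => hmem (e ▸ (by simp : z ∈ l' ++ [z]))
        have hpl : page ∉ l' := fun h => hmem (List.mem_append_left _ h)
        have hfull' : ((l'.length : Int) + 1 = frames) := by simpa using hfull
        simp [pfStepA, hpz, hpl, hfull', hgde]
      have hB : pfStepB frames (d, f) (i, page) = ((d.erase z).insert page (1, i), f + 1) := by
        simp [pfStepB, hcd, hsz, hmin]
      rw [hA, hB]
      refine ⟨rfl, ?_⟩
      have hkeysE : (d.erase z).keys = d.keys.filter (fun x => !(x == z)) := pvKeys_erase d z
      have hndE : (d.erase z).keys.Nodup := by rw [hkeysE]; exact hnd.filter _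
      have hpermE : l'.Perm (d.erase z).keys := by
        rw [hkeysE]
        have h2 := hperm.filter (fun x => !(x == z))
        have h3 : (l' ++ [z]).filter (fun x => !(x == z)) = l' := by
          rw [List.filter_append]
          have h4 : l'.filter (fun x => !(x == z)) = l' :=
            List.filter_eq_self.mpr (fun a ha => by
              simp only [Bool.not_eq_true', beq_eq_false_iff_ne]
              exact fun e => hznotl (e ▸ ha))
          simp [h4]
        rw [← h3]
        exact h2
      apply pvPhase2
      · exact pvVal_insert_self _ page _
      · exact PySem.Dict.nodup_keys_insert _ _ _ hndE
      · rw [PySem.Dict.keys_insert_of_not_contains _ _ hcde]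
        exact ((hpermE.cons page).trans (List.perm_append_singleton page _).symm)
      · have hbase : l'.Pairwise (fun a b => pvLexLt (pvVal d b) (pvVal d a)) :=
          (List.pairwise_append.mp hpair).1
        refine hbase.imp_of_mem ?_
        intro a b ha hb hr
        have hnap : a ≠ page := fun h => hmem (h ▸ List.mem_append_left _ ha)
        have hnbp : b ≠ page := fun h => hmem (h ▸ List.mem_append_left _ hb)
        have hnaz : a ≠ z := fun h => hznotl (h ▸ ha)
        have hnbz : b ≠ z := fun h => hznotl (h ▸ hb)
        rw [pvVal_insert_of_ne _ _ hnap, pvVal_insert_of_ne _ _ hnbp,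
          pvVal_erase_of_ne _ hnaz, pvVal_erase_of_ne _ hnbz]
        exact hr
      · exact fun h => hmem (List.mem_append_left _ h)
      · intro p hp
        rw [PySem.Dict.items_insert_of_not_contains _ _ hcde] at hp
        rcases List.mem_append.mp hp with hp' | hp'
        · have := hbnd _ (pvItems_erase_subset hp')
          omega
        · simp at hp'
          subst hp'
          simp
      · intro p hp q hq heq
        rw [PySem.Dict.items_insert_of_not_contains _ _ hcde] at hp hq
        rcases List.mem_append.mp hp with hp' | hp' <;>
          rcases List.mem_append.mp hq with hq' | hq'
        · exact hinj _ (pvItems_erase_subset hp') _ (pvItems_erase_subset hq') heq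
        · exfalso
          simp at hq'
          subst hq'
          have := (hbnd _ (pvItems_erase_subset hp')).2
          simp at heq
          omega
        · exfalso
          simp at hp'
          subst hp'
          have := (hbnd _ (pvItems_erase_subset hq')).2
          simp at heq
          omega
        · simp at hp' hq'
          rw [hp', hq']
    · -- room left: plain fault
      have hsz : ¬ ((d.size : Int) = frames) := by rw [← hlen]; exact hfull
      have hgd0 : d.getD page (0, i) = (0, i) :=
        PySem.Dict.getD_of_not_contains _ _ hcd
      have hA : pfStepA frames (mem, d, f) (i, page) =
          (PySem.List.insert mem
            ((pfInsPos (d.insert page (1, i)) 1 i mem : Nat) : Int) page,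
           d.insert page (1, i), f + 1) := by
        simp [pfStepA, hmem, hfull, hgd0]
      have hB : pfStepB frames (d, f) (i, page) = (d.insert page (1, i), f + 1) := by
        simp [pfStepB, hcd, hsz]
      rw [hA, hB]
      refine ⟨rfl, ?_⟩
      apply pvPhase2
      · exact pvVal_insert_self _ page _
      · exact PySem.Dict.nodup_keys_insert _ _ _ hnd
      · rw [PySem.Dict.keys_insert_of_not_contains _ _ hcd]
        exact ((hperm.cons page).trans (List.perm_append_singleton page _).symm)
      · refine hpair.imp_of_mem ?_
        intro a b ha hb hr
        have hnap : a ≠ page := fun h => hmem (h ▸ ha)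
        have hnbp : b ≠ page := fun h => hmem (h ▸ hb)
        rw [pvVal_insert_of_ne _ _ hnap, pvVal_insert_of_ne _ _ hnbp]
        exact hr
      · exact hmem
      · intro p hp
        rw [PySem.Dict.items_insert_of_not_contains _ _ hcd] at hp
        rcases List.mem_append.mp hp with hp' | hp'
        · have := hbnd _ hp'
          omega
        · simp at hp'
          subst hp'
          simp
      · intro p hp q hq heq
        rw [PySem.Dict.items_insert_of_not_contains _ _ hcd] at hp hq
        rcases List.mem_append.mp hp with hp' | hp' <;>
          rcases List.mem_append.mp hq with hq' | hq'
        · exact hinj _ hp' _ hq' heq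
        · exfalso
          simp at hq'
          subst hq'
          have := (hbnd _ hp').2
          simp at heq
          omega
        · exfalso
          simp at hp'
          subst hp'
          have := (hbnd _ hq').2
          simp at heq
          omega
        · simp at hp' hq'
          rw [hp', hq']

theorem pvFoldAB (frames : Int) (l : List Int) :
    ∀ (i : Int) (mem : List Int) (d : PySem.Dict Int (Int × Int)) (f : Int),
    pvInv i mem d → frames ≠ 0 →
    ((PySem.List.enumerate l i).foldl (pfStepA frames) (mem, d, f)).2.2 =
      ((PySem.List.enumerate l i).foldl (pfStepB frames) (d, f)).2 := by
  induction l with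
  | nil => intro i mem d f _ _; simp [PySem.List.enumerate_nil]
  | cons p rest ih =>
    intro i mem d f hinv hf
    rw [PySem.List.enumerate_cons]
    simp only [List.foldl_cons]
    obtain ⟨heq, hinv'⟩ := pvStepAB frames i p mem d f hinv hf
    rw [← heq]
    have := ih (i + 1) (pfStepA frames (mem, d, f) (i, p)).1
      (pfStepA frames (mem, d, f) (i, p)).2.1 (pfStepA frames (mem, d, f) (i, p)).2.2 hinv' hf
    simpa using this

-- ===== VERDICT (by name: the statement is the Claim_ definition above) =====
theorem page_fault_spec : Claim_equal_page_fault := by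
  intro pages frames hdom hpre
  unfold Spec_page_fault page_fault page_fault_alt
  by_cases hf : frames ≥ (pages.length : Int)
  · simp only [hf, if_true]
  · simp only [hf, if_false]
    rcases hpre with hpe | hfr
    · subst hpe
      simp [PySem.List.enumerate_nil]
    · have hkeys : (PySem.Dict.empty : PySem.Dict Int (Int × Int)).keys = [] := rfl
      have hitems : (PySem.Dict.empty : PySem.Dict Int (Int × Int)).items = [] := rfl
      have hinv : pvInv 0 [] PySem.Dict.empty := by
        refine ⟨by rw [hkeys]; exact List.nodup_nil, by rw [hkeys], List.Pairwise.nil, ?_, ?_⟩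
        · intro p hp; rw [hitems] at hp; simp at hp
        · intro p hp; rw [hitems] at hp; simp at hp
      exact pvFoldAB frames pages 0 [] PySem.Dict.empty 0 hinv hfr
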